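-- pv_equiv track=rewrite | github.com/sdarmon/stage-M2 | scr/filtrageBulle.py | maj
-- ===== SOURCE A (Python) =====
-- def maj(sequ):
--     s = ""
--     for el in sequ:
--         if el == 'a':
--             s = s + 'A'
--         elif el == 'c':
--             s = s + 'C'
--         elif el == 'g':
--             s = s + 'G'
--         elif el == 't':
--             s = s + 'T'
--         else:
--             s = s + el
--     return s
-- ===== SOURCE B (Python) =====
-- def maj(sequ):
--     # Four staged whole-string passes: each replaces one lowercase nucleotide
--     # everywhere. Correct in any order because the replacements' outputs
--     # ('A','C','G','T') are never targets of a later pass.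
--     for lo, up in (('a', 'A'), ('c', 'C'), ('g', 'G'), ('t', 'T')):
--         sequ = sequ.replace(lo, up)
--     return sequ
-- ===== Notes on version B (the rewrite author's own statement) =====
-- stated objective: alternative
-- what changed: Replaces A's single per-character pass with an if/elif chain and quadratic string accumulation by four staged whole-string str.replace passes, one per nucleotide, correct in any order since the uppercase outputs are never later targets.
import Mathlib
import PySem

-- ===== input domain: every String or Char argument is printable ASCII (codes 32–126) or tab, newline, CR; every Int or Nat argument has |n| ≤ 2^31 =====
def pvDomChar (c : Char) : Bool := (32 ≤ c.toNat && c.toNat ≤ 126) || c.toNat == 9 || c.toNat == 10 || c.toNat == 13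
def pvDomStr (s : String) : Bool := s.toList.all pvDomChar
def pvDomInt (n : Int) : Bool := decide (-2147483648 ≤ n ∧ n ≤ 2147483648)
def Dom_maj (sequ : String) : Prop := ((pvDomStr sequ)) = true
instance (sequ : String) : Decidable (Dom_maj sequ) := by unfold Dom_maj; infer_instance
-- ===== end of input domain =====

-- B replaces A's single per-character pass (if/elif chain, string accumulation) by four
-- staged whole-string replace passes, one per nucleotide (alternative decomposition).

-- ===== PORT A =====
-- A: accumulate s, appending the uppercased nucleotide (or the char itself) one by one.
def maj (sequ : String) : String :=
  String.ofList (sequ.toList.foldl (fun s el =>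
    if el = 'a' then s ++ ['A']
    else if el = 'c' then s ++ ['C']
    else if el = 'g' then s ++ ['G']
    else if el = 't' then s ++ ['T']
    else s ++ [el]) [])

-- ===== PORT B =====
-- B: for each (lo, up) pair, sequ = sequ.replace(lo, up); four staged passes.
def maj_alt (sequ : String) : String :=
  [("a", "A"), ("c", "C"), ("g", "G"), ("t", "T")].foldl
    (fun s p => PySem.Str.replace s p.1 p.2) sequ

-- ===== PRECONDITION & SPEC =====
def Spec_maj (sequ : String) (out : String) : Prop := out = maj_alt sequ
instance (sequ : String) (out : String) : Decidable (Spec_maj sequ out) := by unfold Spec_maj; infer_instance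

-- ===== CLAIM (what is proved, stated in full; the proofs are below) =====
def Claim_equal_maj : Prop := ∀ (sequ : String), Dom_maj sequ → Spec_maj sequ (maj sequ)

-- ===== LEMMAS AND PROOFS =====

-- replace with a single-character pattern is a pointwise substitution
theorem replace_go_single (a b : Char) :
    ∀ (fuel : Nat) (l acc : List Char), l.length ≤ fuel →
      PySem.Chars.replace.go [a] [b] fuel l acc =
        acc.reverse ++ l.map (fun c => if c = a then b else c) := by
  intro fuel
  induction fuel with
  | zero =>
    intro l acc h
    have : l = [] := List.eq_nil_of_length_eq_zero (Nat.le_zero.mp h)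
    subst this
    simp [PySem.Chars.replace.go]
  | succ n ih =>
    intro l acc h
    cases l with
    | nil => simp [PySem.Chars.replace.go]
    | cons c t =>
      by_cases hc : c = a
      · subst hc
        have hpre : List.isPrefixOf [c] (c :: t) = true := by
          simp [List.isPrefixOf]
        rw [PySem.Chars.replace.go, if_pos hpre]
        simp only [List.length_cons] at h
        simp only [List.length_singleton, List.drop_succ_cons, List.drop_zero]
        rw [ih t ([b].reverse ++ acc) (by omega)]
        simp
      · have hpre : List.isPrefixOf [a] (c :: t) = false := by
          simp [List.isPrefixOf]; exact fun h' => hc h'.symm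
        rw [PySem.Chars.replace.go, if_neg (by simp [hpre])]
        simp only [List.length_cons] at h
        rw [ih t (c :: acc) (by omega)]
        simp [hc]

theorem replace_single (a b : Char) (l : List Char) :
    PySem.Chars.replace l [a] [b] = l.map (fun c => if c = a then b else c) := by
  rw [PySem.Chars.replace]
  rw [if_neg (by simp)]
  rw [replace_go_single a b l.length l [] le_rfl]
  simp

-- ===== VERDICT (by name: the statement is the Claim_ definition above) =====
theorem maj_spec : Claim_equal_maj := by
  intro sequ _
  unfold Spec_maj maj maj_alt
  rw [show (fun (s : List Char) (el : Char) =>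
      if el = 'a' then s ++ ['A']
      else if el = 'c' then s ++ ['C']
      else if el = 'g' then s ++ ['G']
      else if el = 't' then s ++ ['T']
      else s ++ [el]) = (fun (s : List Char) (el : Char) =>
      s ++ [if el = 'a' then 'A'
            else if el = 'c' then 'C'
            else if el = 'g' then 'G'
            else if el = 't' then 'T'
            else el]) from by funext s el; split_ifs <;> rfl]
  rw [PySem.List.foldl_append_singleton_eq_map, List.nil_append]
  simp only [List.foldl]
  apply String.ext
  simp only [PySem.Str.toList_replace,
    show ("a" : String).toList = ['a'] from rfl, show ("A" : String).toList = ['A'] from rfl,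
    show ("c" : String).toList = ['c'] from rfl, show ("C" : String).toList = ['C'] from rfl,
    show ("g" : String).toList = ['g'] from rfl, show ("G" : String).toList = ['G'] from rfl,
    show ("t" : String).toList = ['t'] from rfl, show ("T" : String).toList = ['T'] from rfl,
    replace_single, List.map_map, String.toList_ofList]
  · apply List.map_congr_left
    intro c _
    simp only [Function.comp]
    by_cases h1 : c = 'a'
    · subst h1; decide
    by_cases h2 : c = 'c'
    · subst h2; decide
    by_cases h3 : c = 'g'
    · subst h3; decide
    by_cases h4 : c = 't'
    · subst h4; decide
    simp [h1, h2, h3, h4]
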